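-- pv_equiv track=rewrite | github.com/TechnoBlogger14o3/leetcode-solutions | Medium/2025-10-24-2048-Next-Greater-Numerically-Balanced-Number/solution.py | nextGreaterBalanced
-- ===== SOURCE A (Python) =====
-- def nextGreaterBalanced(n: int) -> int:
--     def is_balanced(num):
--         count = {}
--         for digit in str(num):
--             count[digit] = count.get(digit, 0) + 1
--         for digit, cnt in count.items():
--             if int(digit) != cnt:
--                 return False
--         return True
--
--     n += 1
--     while True:
--         if is_balanced(n):
--             return n
--         n += 1
-- ===== SOURCE B (Python) =====
-- def nextGreaterBalanced(n: int) -> int: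
--     # Arithmetic digit scan that leaps over every block of numbers containing a 0 digit
--     # (a balanced number cannot contain a 0), instead of testing each candidate via str().
--     m = n + 1
--     while True:
--         if m == 0:
--             m = 1
--             continue
--         t, digs = m, []
--         while t > 0:
--             digs.append(t % 10)
--             t //= 10
--         if 0 in digs:
--             # jump to the least number >= m whose digits at positions 0..e are all nonzero,
--             # where e is the position of the leftmost zero digit of m
--             e = len(digs) - 1 - digs[::-1].index(0)
--             p = 10 ** (e + 1)
--             m = (m // p) * p + (p - 1) // 9
--         elif all(digs.count(d) == d for d in digs):
--             return m
--         else: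
--             m += 1
-- ===== Notes on version B (the rewrite author's own statement) =====
-- stated objective: alternative
-- what changed: B replaces A's one-by-one scan that stringifies and dict-counts every candidate by an arithmetic digit scan that, whenever the candidate contains a 0 digit, jumps in one step past the whole block of numbers sharing that zero (no balanced number contains a 0), testing only zero-free candidates via integer divmod digit counts.
-- outside the precondition, e.g. on nextGreaterBalanced(-2): A raises ValueError, B returns -1
import Mathlib
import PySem

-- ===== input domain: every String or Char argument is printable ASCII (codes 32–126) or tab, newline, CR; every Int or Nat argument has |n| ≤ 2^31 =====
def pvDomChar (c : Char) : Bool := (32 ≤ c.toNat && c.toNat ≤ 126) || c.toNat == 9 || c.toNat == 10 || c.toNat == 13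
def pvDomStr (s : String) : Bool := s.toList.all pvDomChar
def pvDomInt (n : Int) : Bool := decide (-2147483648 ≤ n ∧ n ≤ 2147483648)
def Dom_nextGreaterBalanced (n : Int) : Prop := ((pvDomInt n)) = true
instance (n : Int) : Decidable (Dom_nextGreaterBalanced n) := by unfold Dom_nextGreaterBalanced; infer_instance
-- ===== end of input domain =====

-- B replaces A's candidate-by-candidate string/dict test with an arithmetic digit scan that
-- jumps past whole blocks of numbers containing a 0 digit (objective: alternative algorithm).

-- ===== PORT A =====

-- is_balanced: count digit chars of str(num) in a dict, then check int(digit) == cnt for each item.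
-- int(digit) is PySem.Int.ofChars? [c]; none = ValueError (reached only for negative num, outside Pre_).
def isBalancedA (m : Int) : Bool :=
  let count := (PySem.Int.toChars m).foldl
    (fun d ch => d.insert ch (d.getD ch 0 + 1)) PySem.Dict.empty
  count.items.all (fun dc =>
    match PySem.Int.ofChars? [dc.1] with
    | some v => v == dc.2
    | none => false)

-- the 'while True' loop; fuel is a totality guard only (inside Pre_ it always suffices, see proofs)
def loopA (m : Int) : Nat → Int
  | 0 => m
  | f + 1 => if isBalancedA m then m else loopA (m + 1) f

def nextGreaterBalanced (n : Int) : Int := loopA (n + 1) (3122334445 - n).toNat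

-- ===== PORT B =====

-- the inner 'while t > 0' digit loop; fuel is a totality guard (t.toNat always suffices)
def digsLoop (t : Int) : Nat → List Int
  | 0 => []
  | f + 1 =>
    if 0 < t then PySem.Int.mod t 10 :: digsLoop (PySem.Int.floordiv t 10) f else []

-- the 'while True' loop of B; digs[::-1] is digs.reverse (PySem.List.slice?_none_none_neg_one),
-- .index(0) is PySem.List.index? (it cannot miss: guarded by '0 in digs')
def loopB (m : Int) : Nat → Int
  | 0 => m
  | f + 1 =>
    if m = 0 then loopB 1 f
    else
      let digs := digsLoop m m.toNat
      if (0 : Int) ∈ digs then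
        let i : Nat := (PySem.List.index? digs.reverse 0).getD 0
        let e : Int := PySem.List.len digs - 1 - (i : Int)
        let p : Int := 10 ^ (e + 1).toNat   -- 10 ** (e+1); e+1 ≥ 1 here
        loopB (PySem.Int.floordiv m p * p + PySem.Int.floordiv (p - 1) 9) f
      else if digs.all (fun d => ((PySem.List.count digs d : Int)) == d) then m
      else loopB (m + 1) f

def nextGreaterBalanced_alt (n : Int) : Int := loopB (n + 1) (3122334445 - n).toNat

-- ===== PRECONDITION & SPEC =====
-- For n ≤ -2 every candidate A tests is negative, so int('-') raises ValueError inside is_balanced.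
def Pre_nextGreaterBalanced (n : Int) : Prop := -1 ≤ n
instance (n : Int) : Decidable (Pre_nextGreaterBalanced n) := by unfold Pre_nextGreaterBalanced; infer_instance
def pvWitness_nextGreaterBalanced : Int := 0

def Spec_nextGreaterBalanced (n : Int) (out : Int) : Prop := out = nextGreaterBalanced_alt n
instance (n : Int) (out : Int) : Decidable (Spec_nextGreaterBalanced n out) := by unfold Spec_nextGreaterBalanced; infer_instance

-- ===== CLAIM (what is proved, stated in full; the proofs are below) =====
def Claim_equal_nextGreaterBalanced : Prop := ∀ (n : Int), Dom_nextGreaterBalanced n → Pre_nextGreaterBalanced n → Spec_nextGreaterBalanced n (nextGreaterBalanced n)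
-- ===== LEMMAS AND PROOFS =====

-- little-endian decimal digits (specification-side only)
def digsN (a : Nat) : List Nat :=
  if h : a = 0 then [] else a % 10 :: digsN (a / 10)
decreasing_by exact Nat.div_lt_self (Nat.pos_of_ne_zero h) (by norm_num)

-- the balancedness specification both ports are reduced to
def BalN (a : Nat) : Prop := ∀ d ∈ digsN a, (digsN a).count d = d

theorem digsN_zero : digsN 0 = [] := by rw [digsN]; simp
theorem digsN_pos {a : Nat} (h : a ≠ 0) : digsN a = a % 10 :: digsN (a / 10) := by
  rw [digsN]; simp [h]

theorem digsN_lt_base : ∀ (a : Nat), ∀ d ∈ digsN a, d < 10 := by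
  intro a
  induction a using Nat.strong_induction_on with
  | _ a ih =>
    by_cases h : a = 0
    · subst h; rw [digsN_zero]; intro d hd; simp at hd
    · rw [digsN_pos h]
      intro d hd
      rcases List.mem_cons.mp hd with h1 | h1
      · subst h1; exact Nat.mod_lt _ (by norm_num)
      · exact ih (a / 10) (Nat.div_lt_self (Nat.pos_of_ne_zero h) (by norm_num)) d h1

theorem digsN_getElem : ∀ (a i : Nat) (h : i < (digsN a).length),
    (digsN a)[i] = a / 10 ^ i % 10 := by
  intro a
  induction a using Nat.strong_induction_on with
  | _ a ih =>
    intro i h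
    by_cases ha : a = 0
    · subst ha; rw [digsN_zero] at h; simp at h
    · rcases i with _ | i
      · simp [digsN_pos ha]
      · have hlt : a / 10 < a := Nat.div_lt_self (Nat.pos_of_ne_zero ha) (by norm_num)
        have hlen : i < (digsN (a / 10)).length := by
          rw [digsN_pos ha] at h; simpa using h
        have := ih (a / 10) hlt i hlen
        simp only [digsN_pos ha, List.getElem_cons_succ]
        rw [this, Nat.div_div_eq_div_mul, ← pow_succ']

theorem lt_pow_len (a : Nat) : a < 10 ^ (digsN a).length := by
  induction a using Nat.strong_induction_on with
  | _ a ih =>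
    by_cases ha : a = 0
    · subst ha; simp [digsN_zero]
    · have hlt : a / 10 < a := Nat.div_lt_self (Nat.pos_of_ne_zero ha) (by norm_num)
      have := ih (a / 10) hlt
      rw [digsN_pos ha]
      simp only [List.length_cons, pow_succ]
      omega

theorem lt_len_of_pow_le {a i : Nat} (h : 10 ^ i ≤ a) : i < (digsN a).length := by
  by_contra hc
  have h2 : 10 ^ (digsN a).length ≤ 10 ^ i := Nat.pow_le_pow_right (by norm_num) (by omega)
  have := lt_pow_len a; omega

theorem pow_le_of_lt_len : ∀ (a i : Nat), i < (digsN a).length → 10 ^ i ≤ a := by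
  intro a
  induction a using Nat.strong_induction_on with
  | _ a ih =>
    intro i h
    by_cases ha : a = 0
    · subst ha; rw [digsN_zero] at h; simp at h
    · rcases i with _ | i
      · simp; omega
      · have hlt : a / 10 < a := Nat.div_lt_self (Nat.pos_of_ne_zero ha) (by norm_num)
        have hlen : i < (digsN (a / 10)).length := by
          rw [digsN_pos ha] at h; simpa using h
        have := ih (a / 10) hlt i hlen
        rw [pow_succ]
        omega

theorem zero_mem_digsN {a i : Nat} (h10 : 10 ^ i ≤ a) (hz : a / 10 ^ i % 10 = 0) :
    0 ∈ digsN a := by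
  have hi : i < (digsN a).length := lt_len_of_pow_le h10
  have := digsN_getElem a i hi
  rw [← hz, ← this]
  exact List.getElem_mem hi

-- repunits 0, 1, 11, 111, …
def rep : Nat → Nat
  | 0 => 0
  | k + 1 => 10 * rep k + 1

theorem nine_rep (k : Nat) : 9 * rep k + 1 = 10 ^ k := by
  induction k with
  | zero => simp [rep]
  | succ k ih => rw [rep, pow_succ]; omega

theorem pow_le_rep (e : Nat) : 10 ^ e ≤ rep (e + 1) := by
  have := nine_rep e; rw [rep]; omega

theorem repunit_zero : ∀ (k t : Nat), t < rep k → ∃ i < k, t / 10 ^ i % 10 = 0 := by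
  intro k
  induction k with
  | zero => intro t ht; simp [rep] at ht
  | succ k ih =>
    intro t ht
    by_cases h0 : t % 10 = 0
    · exact ⟨0, by omega, by simpa using h0⟩
    · have h1 : t / 10 < rep k := by rw [rep] at ht; omega
      obtain ⟨i, hik, hz⟩ := ih (t / 10) h1
      refine ⟨i + 1, by omega, ?_⟩
      rw [pow_succ', ← Nat.div_div_eq_div_mul]
      exact hz

theorem digit_zero_mod_lt {a e : Nat} (he : a / 10 ^ e % 10 = 0) :
    a % 10 ^ (e + 1) < 10 ^ e := by
  rw [pow_succ, Nat.mod_mul, he]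
  simp
  exact Nat.mod_lt _ (pow_pos (by norm_num) e)

theorem zero_in_interval {a j e : Nat} (h1 : a ≤ j)
    (h2 : j < a / 10 ^ (e + 1) * 10 ^ (e + 1) + rep (e + 1)) :
    ∃ i ≤ e, j / 10 ^ i % 10 = 0 := by
  have hp : 0 < 10 ^ (e + 1) := pow_pos (by norm_num) _
  have hdm := Nat.div_add_mod a (10 ^ (e + 1))
  rw [mul_comm] at h2
  set Q := 10 ^ (e + 1) * (a / 10 ^ (e + 1)) with hQ
  set t := j - Q with htdef
  have ht : t < rep (e + 1) := by omega
  obtain ⟨i, hie1, hzi⟩ := repunit_zero (e + 1) t ht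
  refine ⟨i, by omega, ?_⟩
  have hji : j = t + (a / 10 ^ (e + 1) * 10 ^ (e + 1 - i)) * 10 ^ i := by
    have hpow : 10 ^ (e + 1) = 10 ^ (e + 1 - i) * 10 ^ i := by
      rw [← pow_add]; congr 1; omega
    have : Q = a / 10 ^ (e + 1) * 10 ^ (e + 1 - i) * 10 ^ i := by
      rw [hQ, hpow]; ring
    omega
  rw [hji, Nat.add_mul_div_right _ _ (pow_pos (by norm_num) i)]
  have hsplit : a / 10 ^ (e + 1) * 10 ^ (e + 1 - i) =
      a / 10 ^ (e + 1) * 10 ^ (e - i) * 10 := by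
    rw [mul_assoc, ← pow_succ]; congr 2; omega
  rw [hsplit, Nat.add_mul_mod_self_right]
  exact hzi

-- ---- bridges from the ports' Bool tests to BalN ----

theorem ofChars?_digitChar : ∀ d, d < 10 → PySem.Int.ofChars? [Nat.digitChar d] = some (d : Int) := by
  decide

theorem digitChar_inj : ∀ d, d < 10 → ∀ d', d' < 10 → Nat.digitChar d = Nat.digitChar d' → d = d' := by
  decide

theorem count_map_digitChar (l : List Nat) (hl : ∀ x ∈ l, x < 10) (d : Nat) (hd : d < 10) :
    (l.map Nat.digitChar).count (Nat.digitChar d) = l.count d := by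
  induction l with
  | nil => simp
  | cons x xs ih =>
    have hx : x < 10 := hl x (List.mem_cons_self)
    have hxs : ∀ y ∈ xs, y < 10 := fun y hy => hl y (List.mem_cons_of_mem x hy)
    have hcond : (Nat.digitChar x == Nat.digitChar d) = (x == d) := by
      by_cases hxd : x = d
      · subst hxd; simp
      · have hne : Nat.digitChar x ≠ Nat.digitChar d :=
          fun hc => hxd (digitChar_inj x hx d hd hc)
        simp [hxd, hne]
    simp only [List.map_cons, List.count_cons, hcond, ih hxs]

theorem toDigitsCore_eq : ∀ (f a : Nat) (l : List Char), 0 < a → a ≤ f →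
    Nat.toDigitsCore 10 f a l = ((digsN a).map Nat.digitChar).reverse ++ l := by
  intro f
  induction f with
  | zero => intro a l ha hf; omega
  | succ f ih =>
    intro a l ha hf
    have hne : a ≠ 0 := by omega
    by_cases h10 : a / 10 = 0
    · simp only [Nat.toDigitsCore, h10, if_pos]
      rw [digsN_pos hne, h10, digsN_zero]
      simp
    · have hlt : a / 10 < a := Nat.div_lt_self ha (by norm_num)
      simp only [Nat.toDigitsCore, h10, ite_false]
      rw [ih (a / 10) _ (Nat.pos_of_ne_zero h10) (by omega)]
      rw [digsN_pos hne]
      simp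

theorem toDigits_eq : ∀ (a : Nat), 0 < a →
    Nat.toDigits 10 a = ((digsN a).map Nat.digitChar).reverse := by
  intro a ha
  rw [Nat.toDigits, toDigitsCore_eq (a + 1) a [] ha (by omega)]
  simp

theorem toChars_natCast (a : Nat) (ha : 0 < a) :
    PySem.Int.toChars (a : Int) = ((digsN a).map Nat.digitChar).reverse := by
  have h1 : ¬((a : Int) < 0) := by omega
  simp only [PySem.Int.toChars, h1, if_false, Int.toNat_natCast]
  exact toDigits_eq a ha

theorem isBalancedA_iff (a : Nat) (ha : 0 < a) : isBalancedA (a : Int) = true ↔ BalN a := by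
  unfold isBalancedA
  rw [toChars_natCast a ha, PySem.Dict.foldl_insert_getD_add_one_eq_counter]
  simp only [PySem.Dict.items_counter]
  set chars := ((digsN a).map Nat.digitChar).reverse with hchars
  have hcnt : ∀ d : Nat, d < 10 → chars.count (Nat.digitChar d) = (digsN a).count d := by
    intro d hd10
    rw [hchars, List.count_reverse, count_map_digitChar _ (digsN_lt_base a) d hd10]
  constructor
  · intro h d hd
    have hd10 : d < 10 := digsN_lt_base a d hd
    have hmem : Nat.digitChar d ∈ chars := by
      rw [hchars, List.mem_reverse, List.mem_map]
      exact ⟨d, hd, rfl⟩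
    have hmem2 : (Nat.digitChar d, ((chars.count (Nat.digitChar d) : Nat) : Int)) ∈
        (PySem.Set.ofList chars).map (fun k => (k, ((chars.count k : Nat) : Int))) :=
      List.mem_map_of_mem ((PySem.Set.mem_ofList chars _).mpr hmem)
    have := (List.all_eq_true.mp h) _ hmem2
    rw [ofChars?_digitChar d hd10] at this
    have h2 : (d : Int) = ((chars.count (Nat.digitChar d) : Nat) : Int) := by simpa using this
    rw [hcnt d hd10] at h2
    exact_mod_cast h2.symm
  · intro h
    rw [List.all_eq_true]
    intro p hp
    obtain ⟨c, hc, rfl⟩ := List.mem_map.mp hp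
    have hc' : c ∈ chars := (PySem.Set.mem_ofList chars _).mp hc
    rw [hchars, List.mem_reverse, List.mem_map] at hc'
    obtain ⟨d, hd, rfl⟩ := hc'
    have hd10 : d < 10 := digsN_lt_base a d hd
    rw [ofChars?_digitChar d hd10, hcnt d hd10]
    have := h d hd
    simp [this]

theorem isBalancedA_false_of_zero_mem {a : Nat} (ha : 0 < a) (h0 : 0 ∈ digsN a) :
    isBalancedA (a : Int) = false := by
  rw [Bool.eq_false_iff]
  intro hb
  have hbal := (isBalancedA_iff a ha).mp hb
  have := hbal 0 h0
  have : 0 < (digsN a).count 0 := List.count_pos_iff.mpr h0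
  omega

theorem digsLoop_eq : ∀ (f a : Nat), a ≤ f → digsLoop (a : Int) f = (digsN a).map (fun d : Nat => (d : Int)) := by
  intro f
  induction f with
  | zero =>
    intro a h
    have : a = 0 := by omega
    subst this
    simp [digsLoop, digsN_zero]
  | succ f ih =>
    intro a h
    by_cases ha : a = 0
    · subst ha; simp [digsLoop, digsN_zero]
    · have hpos : (0 : Int) < (a : Int) := by exact_mod_cast Nat.pos_of_ne_zero ha
      have h10 : (10 : Int) = ((10 : Nat) : Int) := by norm_num
      simp only [digsLoop, hpos, if_true]
      rw [h10, PySem.Int.mod_natCast, PySem.Int.floordiv_natCast]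
      have hlt : a / 10 < a := Nat.div_lt_self (Nat.pos_of_ne_zero ha) (by norm_num)
      rw [ih (a / 10) (by omega), digsN_pos ha]
      simp

theorem altCheck_iff (a : Nat) :
    (((digsN a).map (fun d : Nat => (d : Int))).all
      (fun d => ((PySem.List.count ((digsN a).map (fun d : Nat => (d : Int))) d : Int)) == d)) = true
    ↔ BalN a := by
  have hcnt : ∀ d : Nat, PySem.List.count ((digsN a).map (fun d : Nat => (d : Int))) ((d : Int)) =
      (digsN a).count d := by
    intro d
    show List.count ((d : Int)) ((digsN a).map (fun d : Nat => (d : Int))) = _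
    rw [List.count_map_of_injective _ _ (fun x y hxy => by exact_mod_cast hxy) d]
  constructor
  · intro h d hd
    have hmem : ((d : Int)) ∈ (digsN a).map (fun d : Nat => (d : Int)) := List.mem_map_of_mem hd
    have := (List.all_eq_true.mp h) _ hmem
    rw [hcnt d] at this
    have h2 : (((digsN a).count d : Nat) : Int) = (d : Int) := by simpa using this
    exact_mod_cast h2
  · intro h
    rw [List.all_eq_true]
    intro x hx
    obtain ⟨d, hd, rfl⟩ := List.mem_map.mp hx
    rw [hcnt d]
    simp [h d hd]

-- ---- loop characterizations ----

theorem loopA_correct : ∀ (fuel : Nat) (m k : Int), m ≤ k → isBalancedA k = true →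
    (∀ j, m ≤ j → j < k → isBalancedA j = false) → (k - m).toNat < fuel →
    loopA m fuel = k := by
  intro fuel
  induction fuel with
  | zero => intro m k h1 _ _ h4; omega
  | succ f ih =>
    intro m k h1 hb hmin hf
    by_cases hm : isBalancedA m = true
    · have hmk : m = k := by
        rcases eq_or_lt_of_le h1 with h | h
        · exact h
        · exact absurd hm (by rw [hmin m le_rfl h]; simp)
      subst hmk
      simp [loopA, hm]
    · have hmk : m ≠ k := fun h => hm (h ▸ hb)
      have hm' : isBalancedA m = false := by
        cases h : isBalancedA m
        · rfl
        · exact absurd h hm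
      simp only [loopA, hm', Bool.false_eq_true, if_false]
      exact ih (m + 1) k (by omega) hb (fun j hj1 hj2 => hmin j (by omega) hj2) (by omega)

theorem balA_zero : isBalancedA 0 = false := by decide

theorem loopB_correct : ∀ (fuel : Nat) (m k : Int), 0 ≤ m → m ≤ k → isBalancedA k = true →
    (∀ j, m ≤ j → j < k → isBalancedA j = false) → (k - m).toNat < fuel →
    loopB m fuel = k := by
  intro fuel
  induction fuel with
  | zero => intro m k _ h1 _ _ h4; omega
  | succ f ih =>
    intro m k hm0 h1 hb hmin hf
    lift m to Nat using hm0 with a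
    by_cases haz : (a : Int) = 0
    · have hk1 : 1 ≤ k := by
        rcases eq_or_lt_of_le h1 with h | h
        · rw [← h, haz] at hb; simp [balA_zero] at hb
        · omega
      simp only [loopB, haz, if_pos]
      exact ih 1 k (by omega) hk1 hb
        (fun j hj1 hj2 => hmin j (by omega) hj2) (by omega)
    · have hane : a ≠ 0 := fun h => haz (by exact_mod_cast h)
      have hapos : 0 < a := Nat.pos_of_ne_zero hane
      have hdigs : digsLoop ((a : Int)) (Int.toNat (a : Int)) =
          (digsN a).map (fun d : Nat => (d : Int)) := by
        rw [Int.toNat_natCast]; exact digsLoop_eq a a le_rfl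
      simp only [loopB, haz, ite_false, hdigs]
      by_cases hz : (0 : Int) ∈ (digsN a).map (fun d : Nat => (d : Int))
      · rw [if_pos hz]
        have hz' : (0 : Nat) ∈ digsN a := by
          obtain ⟨d, hd, hdc⟩ := List.mem_map.mp hz
          have : d = 0 := by exact_mod_cast hdc
          exact this ▸ hd
        have hzr : (0 : Int) ∈ ((digsN a).map (fun d : Nat => (d : Int))).reverse :=
          List.mem_reverse.mpr hz
        obtain ⟨i₀, hidx⟩ : ∃ i₀, PySem.List.index?
            (((digsN a).map (fun d : Nat => (d : Int))).reverse) 0 = some i₀ := by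
          have := (PySem.List.index?_isSome_iff
            (xs := ((digsN a).map (fun d : Nat => (d : Int))).reverse) (v := 0)).mpr hzr
          exact Option.isSome_iff_exists.mp this
        obtain ⟨hi₀len, hget, -⟩ := PySem.List.getElem_of_index?_eq_some hidx
        rw [hidx]
        simp only [Option.getD_some]
        set lenN := (digsN a).length with hlenN
        have hlen' : (((digsN a).map (fun d : Nat => (d : Int))).reverse).length = lenN := by
          simp [hlenN]
        have hi₀ : i₀ < lenN := by rw [← hlen']; exact hi₀len
        set eN := lenN - 1 - i₀ with heN
        have heNlen : eN < lenN := by omega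
        -- the digit of a at position eN is 0
        have hgd : (digsN a)[eN]'(heNlen) = 0 := by
          have h1' := hget
          rw [List.getElem_reverse] at h1'
          simp only [List.getElem_map, List.length_map] at h1'
          exact_mod_cast h1'
        have hdz : a / 10 ^ eN % 10 = 0 := by
          rw [← digsN_getElem a eN heNlen]; exact hgd
        -- simplify the successor argument to a Nat literal
        set pN := 10 ^ (eN + 1) with hpN
        have hpNpos : 0 < pN := pow_pos (by norm_num) _
        have harg : PySem.Int.floordiv (a : Int)
              ((10 : Int) ^ ((PySem.List.len ((digsN a).map (fun d : Nat => (d : Int))) - 1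
                  - (i₀ : Int) + 1).toNat)) *
              ((10 : Int) ^ ((PySem.List.len ((digsN a).map (fun d : Nat => (d : Int))) - 1
                  - (i₀ : Int) + 1).toNat)) +
              PySem.Int.floordiv
                ((10 : Int) ^ ((PySem.List.len ((digsN a).map (fun d : Nat => (d : Int))) - 1
                  - (i₀ : Int) + 1).toNat) - 1) 9
            = ((a / pN * pN + rep (eN + 1) : Nat) : Int) := by
          have hlen2 : PySem.List.len ((digsN a).map (fun d : Nat => (d : Int))) = (lenN : Int) := by
            simp [PySem.List.len_eq, hlenN]
          rw [hlen2]
          have hexp : ((lenN : Int) - 1 - (i₀ : Int) + 1).toNat = eN + 1 := by omega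
          rw [hexp]
          have hcastp : ((10 : Int) ^ (eN + 1)) = ((pN : Nat) : Int) := by
            rw [hpN]; push_cast; ring
          rw [hcastp]
          have h9 : (9 : Int) = ((9 : Nat) : Int) := by norm_num
          have hsub : (((pN : Nat) : Int) - 1) = (((pN - 1 : Nat)) : Int) := by
            have : 1 ≤ pN := hpNpos
            push_cast [this]; ring
          rw [hsub, h9, PySem.Int.floordiv_natCast, PySem.Int.floordiv_natCast]
          have hrep9 : (pN - 1) / 9 = rep (eN + 1) := by
            have := nine_rep (eN + 1)
            rw [← hpN] at this
            omega
          rw [hrep9]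
          push_cast
          ring
        rw [harg]
        -- arithmetic facts about the jump target
        have hmod : a % pN < 10 ^ eN := by
          rw [hpN]; exact digit_zero_mod_lt hdz
        have hrepge : 10 ^ eN ≤ rep (eN + 1) := pow_le_rep eN
        have hdm := Nat.div_add_mod a pN
        have hcomm : a / pN * pN = pN * (a / pN) := Nat.mul_comm _ _
        have hprog : a < a / pN * pN + rep (eN + 1) := by omega
        -- no balanced number in [a, jump target)
        have hnob : ∀ j : Int, (a : Int) ≤ j → j < ((a / pN * pN + rep (eN + 1) : Nat) : Int) →
            isBalancedA j = false := by
          intro j hj1 hj2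
          have hj0 : 0 ≤ j := by omega
          lift j to Nat using hj0 with jn
          have hjn1 : a ≤ jn := by exact_mod_cast hj1
          have hjn2 : jn < a / 10 ^ (eN + 1) * 10 ^ (eN + 1) + rep (eN + 1) := by
            rw [← hpN]; exact_mod_cast hj2
          obtain ⟨i, hie, hzij⟩ := zero_in_interval hjn1 hjn2
          have hpow_le : 10 ^ i ≤ jn := by
            calc 10 ^ i ≤ 10 ^ eN := Nat.pow_le_pow_right (by norm_num) hie
            _ ≤ a := pow_le_of_lt_len a eN heNlen
            _ ≤ jn := hjn1
          have h0mem : 0 ∈ digsN jn := zero_mem_digsN hpow_le hzij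
          have hjnpos : 0 < jn := by
            have := pow_pos (show 0 < 10 by norm_num) i; omega
          exact isBalancedA_false_of_zero_mem hjnpos h0mem
        have hm'k : ((a / pN * pN + rep (eN + 1) : Nat) : Int) ≤ k := by
          by_contra hc
          exact absurd hb (by rw [hnob k h1 (by omega)]; simp)
        exact ih _ k (by positivity) hm'k hb
          (fun j hj1 hj2 => hmin j (by
            have : (a : Int) ≤ ((a / pN * pN + rep (eN + 1) : Nat) : Int) := by
              exact_mod_cast Nat.le_of_lt hprog
            omega) hj2)
          (by
            have hpc : (a : Int) < ((a / pN * pN + rep (eN + 1) : Nat) : Int) := by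
              exact_mod_cast hprog
            omega)
      · rw [if_neg hz]
        by_cases hbal : BalN a
        · rw [if_pos ((altCheck_iff a).mpr hbal)]
          have hmA : isBalancedA (a : Int) = true := (isBalancedA_iff a hapos).mpr hbal
          rcases eq_or_lt_of_le h1 with h | h
          · exact h
          · exact absurd hmA (by rw [hmin _ le_rfl h]; simp)
        · rw [if_neg (fun hc => hbal ((altCheck_iff a).mp hc))]
          have hmA : isBalancedA (a : Int) = false := by
            cases h : isBalancedA (a : Int)
            · rfl
            · exact absurd ((isBalancedA_iff a hapos).mp h) hbal
          have hk : (a : Int) + 1 ≤ k := by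
            rcases eq_or_lt_of_le h1 with h | h
            · exact absurd hb (by rw [← h, hmA]; simp)
            · omega
          exact ih ((a : Int) + 1) k (by omega) hk hb
            (fun j hj1 hj2 => hmin j (by omega) hj2) (by omega)

theorem balN0 : isBalancedA 3122334444 = true := by decide

-- ===== VERDICT (by name: the statement is the Claim_ definition above) =====
theorem nextGreaterBalanced_spec : Claim_equal_nextGreaterBalanced := by
  intro n hDom hPre
  unfold Spec_nextGreaterBalanced nextGreaterBalanced nextGreaterBalanced_alt
  have hdom : -2147483648 ≤ n ∧ n ≤ 2147483648 := by
    have := of_decide_eq_true hDom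
    simpa [pvDomInt] using this
  have hpre : -1 ≤ n := hPre
  set m₀ := n + 1 with hm₀
  have hm₀0 : 0 ≤ m₀ := by omega
  have hm₀N : m₀ ≤ 3122334444 := by omega
  have hex : ∃ d : Nat, isBalancedA (m₀ + d) = true := by
    refine ⟨(3122334444 - m₀).toNat, ?_⟩
    have : m₀ + ((3122334444 - m₀).toNat : Int) = 3122334444 := by omega
    rw [this]; exact balN0
  classical
  let d₀ := Nat.find hex
  have hkbal : isBalancedA (m₀ + (d₀ : Int)) = true := Nat.find_spec hex
  have hmin : ∀ j : Int, m₀ ≤ j → j < m₀ + (d₀ : Int) → isBalancedA j = false := by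
    intro j h1 h2
    have hj : j = m₀ + ((j - m₀).toNat : Int) := by omega
    have hlt : (j - m₀).toNat < d₀ := by omega
    have := Nat.find_min hex hlt
    rw [hj]
    exact Bool.eq_false_iff.mpr this
  have hd₀ : d₀ ≤ (3122334444 - m₀).toNat := Nat.find_min' hex (by
    have : m₀ + ((3122334444 - m₀).toNat : Int) = 3122334444 := by omega
    rw [this]; exact balN0)
  have hfuel : ((m₀ + (d₀ : Int)) - m₀).toNat < (3122334445 - n).toNat := by omega
  rw [loopA_correct _ _ _ (by omega) hkbal hmin hfuel,
      loopB_correct _ _ _ hm₀0 (by omega) hkbal hmin hfuel]
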